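-- pv_equiv track=rewrite | github.com/garvitsingh171/python-dojo | DOJO/contigous_subarray_max_bw_left_right.py | count
-- ===== SOURCE A (Python) =====
-- def count(nums, bound):
--     count = 0
--     curr = 0
--
--     for num in nums:
--         if num <= bound:
--             curr += 1
--             count += curr
--         else:
--             curr = 0
--
--     return count
-- ===== SOURCE B (Python) =====
-- def count(nums, bound):
--     # Complement counting: start from all n*(n+1)//2 subarrays and subtract
--     # the subarrays containing an element > bound.  Group those by the
--     # position p of their FIRST such element (previous one at prev):
--     # p - prev choices of left end, n - p choices of right end.
--     n = len(nums)
--     total = n * (n + 1) // 2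
--     prev = -1
--     for p, x in enumerate(nums):
--         if x > bound:
--             total -= (p - prev) * (n - p)
--             prev = p
--     return total
-- ===== Notes on version B (the rewrite author's own statement) =====
-- stated objective: alternative
-- what changed: B counts by complement: it starts from the total n*(n+1)//2 of all subarrays and subtracts, for each element > bound at position p (previous such at prev), the (p-prev)*(n-p) subarrays whose first over-bound element is p, instead of A's direct per-element accumulation of valid run lengths.
import Mathlib
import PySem

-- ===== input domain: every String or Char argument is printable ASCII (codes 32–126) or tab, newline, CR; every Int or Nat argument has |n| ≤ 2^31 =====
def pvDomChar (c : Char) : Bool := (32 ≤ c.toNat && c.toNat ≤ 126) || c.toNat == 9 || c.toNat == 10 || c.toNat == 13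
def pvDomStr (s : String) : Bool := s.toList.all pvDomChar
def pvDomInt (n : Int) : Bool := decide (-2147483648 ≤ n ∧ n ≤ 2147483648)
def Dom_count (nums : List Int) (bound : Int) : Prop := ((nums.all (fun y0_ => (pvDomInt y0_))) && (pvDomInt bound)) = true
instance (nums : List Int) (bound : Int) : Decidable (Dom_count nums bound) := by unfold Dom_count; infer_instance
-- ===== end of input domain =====

-- B counts by complement: all n*(n+1)//2 subarrays minus, per element > bound at position p
-- (previous such at prev), the (p-prev)*(n-p) subarrays whose first over-bound element is p;
-- same O(n) cost, a different counting scheme (objective: alternative).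

-- ===== PORT A =====
-- for num in nums: if num <= bound: curr += 1; count += curr else: curr = 0
def count (nums : List Int) (bound : Int) : Int :=
  (nums.foldl (fun (st : Int × Int) num =>
    if num ≤ bound then (st.1 + (st.2 + 1), st.2 + 1) else (st.1, 0)) (0, 0)).1

-- ===== PORT B =====
-- total = n*(n+1)//2; for p, x in enumerate(nums): if x > bound: total -= (p-prev)*(n-p); prev = p
def count_alt (nums : List Int) (bound : Int) : Int :=
  let n : Int := nums.length
  ((PySem.List.enumerate nums).foldl (fun (st : Int × Int) px =>
    if px.2 > bound then (st.1 - (px.1 - st.2) * (n - px.1), px.1) else st)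
    (PySem.Int.floordiv (n * (n + 1)) 2, -1)).1

-- ===== PRECONDITION & SPEC =====
def Spec_count (nums : List Int) (bound : Int) (out : Int) : Prop := out = count_alt nums bound
instance (nums : List Int) (bound : Int) (out : Int) : Decidable (Spec_count nums bound out) := by unfold Spec_count; infer_instance

-- ===== CLAIM =====
def Claim_equal_count : Prop := ∀ (nums : List Int) (bound : Int), Dom_count nums bound → Spec_count nums bound (count nums bound)

-- ===== LEMMAS AND PROOFS =====

def pvTri (L : Int) : Int := PySem.Int.floordiv (L * (L + 1)) 2

theorem pvTri_succ (L : Int) : pvTri (L + 1) = pvTri L + (L + 1) := by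
  have e := fun a : Int => PySem.Int.floordiv_eq_ediv_of_pos (a := a) (b := 2) (by norm_num)
  unfold pvTri
  rw [e, e]
  have h : (L + 1) * (L + 1 + 1) = L * (L + 1) + 2 * (L + 1) := by ring
  rw [h]
  omega

theorem pvTri_neg_one : pvTri (-1) = 0 := by decide

-- Invariant: after processing a prefix ending at index i, A's state (c, k) and B's state (t, prev)
-- satisfy k = i - 1 - prev and t = c + (i - prev) * (n - i) + pvTri (n - i - 1).
theorem count_inv (bound n : Int) (xs : List Int) (i c k t prev : Int)
    (hn : i + xs.length = n)
    (hk : k = i - 1 - prev)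
    (ht : t = c + (i - prev) * (n - i) + pvTri (n - i - 1)) :
    (xs.foldl (fun (st : Int × Int) num =>
      if num ≤ bound then (st.1 + (st.2 + 1), st.2 + 1) else (st.1, 0)) (c, k)).1
    = ((PySem.List.enumerate xs i).foldl (fun (st : Int × Int) px =>
      if px.2 > bound then (st.1 - (px.1 - st.2) * (n - px.1), px.1) else st) (t, prev)).1 := by
  induction xs generalizing i c k t prev with
  | nil =>
    simp only [PySem.List.enumerate, List.foldl_nil]
    have hi : i = n := by simpa using hn
    subst hi
    rw [ht]
    simp [pvTri_neg_one]
  | cons x xs ih =>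
    rw [PySem.List.enumerate_cons]
    simp only [List.foldl_cons, List.length_cons] at hn ⊢
    have hn' : (i + 1) + (xs.length : Int) = n := by push_cast at hn ⊢; omega
    have htri : pvTri (n - i - 1) = pvTri (n - i - 2) + (n - i - 1) := by
      have := pvTri_succ (n - i - 2)
      have e : n - i - 2 + 1 = n - i - 1 := by ring
      rw [e] at this
      omega
    by_cases hx : x ≤ bound
    · have hx2 : ¬ x > bound := by omega
      simp only [if_pos hx, if_neg hx2]
      refine ih (i + 1) (c + (k + 1)) (k + 1) t prev hn' (by omega) ?_
      rw [htri] at ht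
      rw [show n - (i + 1) - 1 = n - i - 2 from by ring]
      linear_combination ht - hk
    · have hx2 : x > bound := by omega
      simp only [if_neg hx, if_pos hx2]
      refine ih (i + 1) c 0 (t - (i - prev) * (n - i)) i hn' (by ring) ?_
      rw [htri] at ht
      rw [show n - (i + 1) - 1 = n - i - 2 from by ring]
      linear_combination ht

-- ===== VERDICT =====
theorem count_spec : Claim_equal_count := by
  intro nums bound _
  unfold Spec_count count count_alt
  have h0 : PySem.Int.floordiv ((nums.length : Int) * ((nums.length : Int) + 1)) 2
      = 0 + ((0 : Int) - (-1)) * ((nums.length : Int) - 0) + pvTri ((nums.length : Int) - 0 - 1) := by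
    have := pvTri_succ ((nums.length : Int) - 1)
    rw [show (nums.length : Int) - 1 + 1 = (nums.length : Int) from by ring] at this
    rw [show (nums.length : Int) - 0 - 1 = (nums.length : Int) - 1 from by ring]
    unfold pvTri at this ⊢
    omega
  have h := count_inv bound (nums.length : Int) nums 0 0 0
    (PySem.Int.floordiv ((nums.length : Int) * ((nums.length : Int) + 1)) 2) (-1)
    (by simp) (by ring) h0
  simpa using h
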